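-- pv_equiv track=rewrite | github.com/anh0001/rtmpose-runner | launch_fiftyone.py | _build_face_edges
-- ===== SOURCE A (Python) =====
-- def _build_face_edges(offset):
--     edges = []
--
--     def line(start, end):
--         edges.extend([[i + offset, i + 1 + offset] for i in range(start, end)])
--
--     def loop(start, count):
--         edges.extend([[start + i + offset, start + i + 1 + offset]
--                       for i in range(count - 1)])
--         edges.append([start + count - 1 + offset, start + offset])
--
--     # Jawline 0-16
--     line(0, 16)
--     # Eyebrows 17-21 and 22-26
--     line(17, 21)
--     line(22, 26)
--     # Nose bridge 27-30 and nose bottom 31-35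
--     line(27, 30)
--     line(31, 35)
--     edges.append([30 + offset, 31 + offset])
--     # Eyes 36-41 and 42-47
--     loop(36, 6)
--     loop(42, 6)
--     # Mouth outer 48-59 and inner 60-67
--     loop(48, 12)
--     loop(60, 8)
--
--     return edges
-- ===== SOURCE B (Python) =====
-- # All edges of the 68-point face topology, precomputed once at offset 0.
-- _BASE_EDGES = (
--     (0, 1), (1, 2), (2, 3), (3, 4), (4, 5), (5, 6), (6, 7), (7, 8),
--     (8, 9), (9, 10), (10, 11), (11, 12), (12, 13), (13, 14), (14, 15), (15, 16),
--     (17, 18), (18, 19), (19, 20), (20, 21),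
--     (22, 23), (23, 24), (24, 25), (25, 26),
--     (27, 28), (28, 29), (29, 30),
--     (31, 32), (32, 33), (33, 34), (34, 35),
--     (30, 31),
--     (36, 37), (37, 38), (38, 39), (39, 40), (40, 41), (41, 36),
--     (42, 43), (43, 44), (44, 45), (45, 46), (46, 47), (47, 42),
--     (48, 49), (49, 50), (50, 51), (51, 52), (52, 53), (53, 54),
--     (54, 55), (55, 56), (56, 57), (57, 58), (58, 59), (59, 48),
--     (60, 61), (61, 62), (62, 63), (63, 64), (64, 65), (65, 66), (66, 67), (67, 60),
-- )
--
-- def _build_face_edges(offset):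
--     return [[a + offset, b + offset] for a, b in _BASE_EDGES]
-- ===== Notes on version B (the rewrite author's own statement) =====
-- stated objective: simpler
-- what changed: Replaces A's run-time edge generation (helper closures line/loop appending ranges) with a flat precomputed constant table of every base edge and a single offset-adding list comprehension.
import Mathlib
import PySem

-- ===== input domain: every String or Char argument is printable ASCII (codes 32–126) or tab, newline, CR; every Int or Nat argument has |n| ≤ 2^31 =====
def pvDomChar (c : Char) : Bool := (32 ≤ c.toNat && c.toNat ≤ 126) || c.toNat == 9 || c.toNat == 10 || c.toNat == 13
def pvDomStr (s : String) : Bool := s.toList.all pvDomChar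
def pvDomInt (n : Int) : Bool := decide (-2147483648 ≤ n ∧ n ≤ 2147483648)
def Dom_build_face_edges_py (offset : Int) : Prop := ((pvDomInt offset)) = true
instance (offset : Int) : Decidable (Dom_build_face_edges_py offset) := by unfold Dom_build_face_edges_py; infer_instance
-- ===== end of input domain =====

-- B replaces A's run-time edge generation (line/loop helpers over ranges) with a flat
-- precomputed constant table of every base edge and one offset-adding map; objective: simpler.

-- ===== PORT A =====
-- helper `line(start, end)`: edges.extend([[i+offset, i+1+offset] for i in range(start, end)])
def pvLineA (offset : Int) (edges : List (List Int)) (start e : Int) : List (List Int) :=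
  edges ++ (PySem.List.pyRange start e 1).map (fun i => [i + offset, i + 1 + offset])

-- helper `loop(start, count)`: extend count-1 consecutive pairs, then append the closing edge
def pvLoopA (offset : Int) (edges : List (List Int)) (start count : Int) : List (List Int) :=
  (edges ++ (PySem.List.pyRange 0 (count - 1) 1).map
      (fun i => [start + i + offset, start + i + 1 + offset]))
    ++ [[start + count - 1 + offset, start + offset]]

def build_face_edges_py (offset : Int) : List (List Int) :=
  let edges : List (List Int) := []
  let edges := pvLineA offset edges 0 16
  let edges := pvLineA offset edges 17 21
  let edges := pvLineA offset edges 22 26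
  let edges := pvLineA offset edges 27 30
  let edges := pvLineA offset edges 31 35
  let edges := edges ++ [[30 + offset, 31 + offset]]
  let edges := pvLoopA offset edges 36 6
  let edges := pvLoopA offset edges 42 6
  let edges := pvLoopA offset edges 48 12
  let edges := pvLoopA offset edges 60 8
  edges

-- ===== PORT B =====
-- all edges of the 68-point face topology, precomputed at offset 0
def pvBaseEdges : List (Int × Int) :=
  [(0, 1), (1, 2), (2, 3), (3, 4), (4, 5), (5, 6), (6, 7), (7, 8),
   (8, 9), (9, 10), (10, 11), (11, 12), (12, 13), (13, 14), (14, 15), (15, 16),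
   (17, 18), (18, 19), (19, 20), (20, 21),
   (22, 23), (23, 24), (24, 25), (25, 26),
   (27, 28), (28, 29), (29, 30),
   (31, 32), (32, 33), (33, 34), (34, 35),
   (30, 31),
   (36, 37), (37, 38), (38, 39), (39, 40), (40, 41), (41, 36),
   (42, 43), (43, 44), (44, 45), (45, 46), (46, 47), (47, 42),
   (48, 49), (49, 50), (50, 51), (51, 52), (52, 53), (53, 54),
   (54, 55), (55, 56), (56, 57), (57, 58), (58, 59), (59, 48),
   (60, 61), (61, 62), (62, 63), (63, 64), (64, 65), (65, 66), (66, 67), (67, 60)]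

def build_face_edges_py_alt (offset : Int) : List (List Int) :=
  pvBaseEdges.map (fun p => [p.1 + offset, p.2 + offset])

-- ===== PRECONDITION & SPEC =====
def Spec_build_face_edges_py (offset : Int) (out : List (List Int)) : Prop := out = build_face_edges_py_alt offset
instance (offset : Int) (out : List (List Int)) : Decidable (Spec_build_face_edges_py offset out) := by unfold Spec_build_face_edges_py; infer_instance

-- ===== CLAIM =====
def Claim_equal_build_face_edges_py : Prop := ∀ (offset : Int), Dom_build_face_edges_py offset → Spec_build_face_edges_py offset (build_face_edges_py offset)

-- ===== LEMMAS AND PROOFS =====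

-- ===== VERDICT =====
theorem build_face_edges_py_spec : Claim_equal_build_face_edges_py := by
  intro offset _
  show build_face_edges_py offset = build_face_edges_py_alt offset
  simp only [build_face_edges_py, build_face_edges_py_alt, pvLineA, pvLoopA, pvBaseEdges,
        PySem.List.pyRange]
  simp [List.range_succ]
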